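-- pv_equiv track=rewrite | github.com/lequyanh/SVMmykointrons | tools/process-gff.py | extract_introns
-- ===== SOURCE A (Python) =====
-- def extract_introns(sequences):
--     """
--     Returns positions of introns in a gene given non-intron sequences
--     present in the gene.
--     """
--     sequences = map(lambda s: (s[2], s[3]) if s[2] <= s[3] else (s[3], s[2]),
--                     sequences)
--     sequences = sorted(sequences, key=lambda s: s[0])
--
--     s = list(map(lambda s: s[0], sequences))
--     e = list(map(lambda s: s[1], sequences))
--
--     start = min(s)
--     end = max(e)
--
--     last = start
--     introns = []
--
--     for i in range(len(sequences)):
--         if s[i] > last + 1: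
--             introns.append((last + 1, s[i] - 1))
--         last = max(last, e[i])
--
--     return introns
-- ===== SOURCE B (Python) =====
-- def extract_introns(sequences):
--     """
--     Returns positions of introns in a gene given non-intron sequences
--     present in the gene.
--     """
--     ivals = sorted(((min(s[2], s[3]), max(s[2], s[3])) for s in sequences),
--                    key=lambda t: t[0])
--     clusters = []
--     for lo, hi in ivals:
--         if clusters and lo <= clusters[-1][1] + 1:
--             clusters[-1] = (clusters[-1][0], max(clusters[-1][1], hi))
--         else:
--             clusters.append((lo, hi))
--     return [(a[1] + 1, b[0] - 1) for a, b in zip(clusters, clusters[1:])]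
-- ===== Notes on version B (the rewrite author's own statement) =====
-- stated objective: alternative
-- what changed: Instead of a single sweep that threads a running 'last' maximum and appends gaps inline, B first merges the sorted intervals into an explicit list of disjoint clusters and then emits the gap between each pair of consecutive clusters.
import Mathlib
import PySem

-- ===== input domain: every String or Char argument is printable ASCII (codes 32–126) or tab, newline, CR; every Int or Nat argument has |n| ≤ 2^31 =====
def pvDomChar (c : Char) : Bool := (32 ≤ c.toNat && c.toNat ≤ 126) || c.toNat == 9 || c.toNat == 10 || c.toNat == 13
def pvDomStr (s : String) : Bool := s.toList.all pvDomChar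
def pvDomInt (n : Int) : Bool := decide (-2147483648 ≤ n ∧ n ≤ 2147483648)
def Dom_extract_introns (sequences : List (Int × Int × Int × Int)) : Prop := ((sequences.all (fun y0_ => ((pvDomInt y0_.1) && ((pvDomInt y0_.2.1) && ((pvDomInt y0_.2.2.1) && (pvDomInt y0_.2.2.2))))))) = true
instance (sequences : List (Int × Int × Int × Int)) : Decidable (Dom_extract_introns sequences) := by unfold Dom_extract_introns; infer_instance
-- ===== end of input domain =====

-- B replaces A's inline gap-emitting sweep by merging intervals into explicit disjoint
-- clusters and then listing the gaps between consecutive clusters (objective: alternative).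

-- ===== PORT A =====
-- (s[2], s[3]) if s[2] <= s[3] else (s[3], s[2])
def pvNormA (q : Int × Int × Int × Int) : Int × Int :=
  if q.2.2.1 ≤ q.2.2.2 then (q.2.2.1, q.2.2.2) else (q.2.2.2, q.2.2.1)

-- the 'for i in range(len(sequences))' loop, threading (last, introns)
def pvALoop : List (Int × Int) → Int → List (Int × Int) → List (Int × Int)
  | [], _, introns => introns
  | (si, ei) :: rest, last, introns =>
      pvALoop rest (max last ei)
        (if si > last + 1 then introns ++ [(last + 1, si - 1)] else introns)

def extract_introns (sequences : List (Int × Int × Int × Int)) : List (Int × Int) :=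
  let seqs := sequences.map pvNormA
  let seqs := PySem.List.sorted seqs (fun s => s.1) false
  let s := seqs.map (fun s => s.1)
  let e := seqs.map (fun s => s.2)
  -- start = min(s); end = max(e): both raise ValueError exactly when sequences = [],
  -- which Pre_ excludes ('end' is otherwise unused dead code in A)
  match PySem.List.min? s (fun y => y) with
  | none => []
  | some start =>
      -- loop reads s[i], e[i] in index order, i.e. traverses s.zip e
      pvALoop (s.zip e) start []

-- ===== PORT B =====
def pvNormB (q : Int × Int × Int × Int) : Int × Int :=
  (min q.2.2.1 q.2.2.2, max q.2.2.1 q.2.2.2)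

-- the cluster-building loop: acc ++ [cur] is Source B's 'clusters' list, cur its last element
def pvClusters : List (Int × Int) → (Int × Int) → List (Int × Int) → List (Int × Int)
  | [], cur, acc => acc ++ [cur]
  | (lo, hi) :: rest, cur, acc =>
      if lo ≤ cur.2 + 1 then pvClusters rest (cur.1, max cur.2 hi) acc
      else pvClusters rest (lo, hi) (acc ++ [cur])

-- zip(clusters, clusters[1:]) comprehension
def pvGaps : List (Int × Int) → List (Int × Int)
  | a :: b :: rest => (a.2 + 1, b.1 - 1) :: pvGaps (b :: rest)
  | _ => []

def extract_introns_alt (sequences : List (Int × Int × Int × Int)) : List (Int × Int) :=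
  match PySem.List.sorted (sequences.map pvNormB) (fun t => t.1) false with
  | [] => []
  | c :: rest => pvGaps (pvClusters rest c [])

-- ===== PRECONDITION & SPEC =====
-- A raises ValueError (min of an empty sequence) on the empty list; Pre_ excludes exactly that.
def Pre_extract_introns (sequences : List (Int × Int × Int × Int)) : Prop := sequences ≠ []
instance (sequences : List (Int × Int × Int × Int)) : Decidable (Pre_extract_introns sequences) := by unfold Pre_extract_introns; infer_instance
def pvWitness_extract_introns : (List (Int × Int × Int × Int)) := [(1, 1, 9, 3), (2, 2, 20, 30)]

def Spec_extract_introns (sequences : List (Int × Int × Int × Int)) (out : List (Int × Int)) : Prop := out = extract_introns_alt sequences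
instance (sequences : List (Int × Int × Int × Int)) (out : List (Int × Int)) : Decidable (Spec_extract_introns sequences out) := by unfold Spec_extract_introns; infer_instance

-- ===== CLAIM (what is proved, stated in full; the proofs are below) =====
def Claim_equal_extract_introns : Prop := ∀ (sequences : List (Int × Int × Int × Int)), Dom_extract_introns sequences → Pre_extract_introns sequences → Spec_extract_introns sequences (extract_introns sequences)

-- ===== LEMMAS AND PROOFS =====

-- the two normalizations agree
theorem pvNorm_eq (q : Int × Int × Int × Int) : pvNormA q = pvNormB q := by
  unfold pvNormA pvNormB
  split_ifs with h <;> simp [min_def, max_def, h]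

-- gaps ignore the second component of the final cluster
theorem pvGaps_last_snd (xs : List (Int × Int)) (a : Int) (b b' : Int) :
    pvGaps (xs ++ [(a, b)]) = pvGaps (xs ++ [(a, b')]) := by
  induction xs with
  | nil => rfl
  | cons x xs ih =>
    cases xs with
    | nil => rfl
    | cons y ys => simpa [pvGaps] using ih

-- appending one more cluster appends exactly one gap
theorem pvGaps_append_two (xs : List (Int × Int)) (a b : Int × Int) :
    pvGaps (xs ++ [a, b]) = pvGaps (xs ++ [a]) ++ [(a.2 + 1, b.1 - 1)] := by
  induction xs with
  | nil => rfl
  | cons x xs ih =>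
    cases xs with
    | nil => rfl
    | cons y ys => simpa [pvGaps] using ih

-- main invariant: A's sweep with last = cur.2 and introns = gaps so far
-- equals the gaps of B's finished cluster list
theorem pvMain (rest : List (Int × Int)) (cur : Int × Int) (acc : List (Int × Int))
    (h : ∀ p ∈ rest, p.1 ≤ p.2) :
    pvALoop rest cur.2 (pvGaps (acc ++ [cur])) = pvGaps (pvClusters rest cur acc) := by
  induction rest generalizing cur acc with
  | nil => rfl
  | cons p rest ih =>
    obtain ⟨lo, hi⟩ := p
    have hph : lo ≤ hi := h (lo, hi) (by simp)
    have h' : ∀ p ∈ rest, p.1 ≤ p.2 := fun p hp => h p (List.mem_cons_of_mem _ hp)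
    by_cases hlo : lo ≤ cur.2 + 1
    · have hif : ¬ (lo > cur.2 + 1) := by omega
      simp only [pvALoop, pvClusters, if_pos hlo, if_neg hif]
      have := ih (cur := (cur.1, max cur.2 hi)) (acc := acc) h'
      rwa [pvGaps_last_snd acc cur.1 (max cur.2 hi) cur.2] at this
    · have hif : lo > cur.2 + 1 := by omega
      have hmax : max cur.2 hi = hi := by omega
      simp only [pvALoop, pvClusters, if_neg hlo, if_pos hif, hmax]
      have := ih (cur := (lo, hi)) (acc := acc ++ [cur]) h'
      rw [← this, List.append_assoc]
      congr 1
      simpa using (pvGaps_append_two acc cur (lo, hi)).symm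

-- min of a list whose head is minimal is the head
theorem pvMin_head (m : Int) (t : List Int) (h : ∀ y ∈ t, m ≤ y) :
    PySem.List.min? (m :: t) (fun y => y) = some m := by
  rw [PySem.List.min?_id_cons]
  congr 1
  induction t generalizing m with
  | nil => rfl
  | cons x t ih =>
    have hx : min m x = m := by
      have := h x (by simp); omega
    simp only [List.foldl, hx]
    exact ih m (fun y hy => h y (List.mem_cons_of_mem _ hy))

-- zip of the two projection maps is the identity
theorem pvZip_proj (l : List (Int × Int)) :
    (l.map (fun s => s.1)).zip (l.map (fun s => s.2)) = l := by
  induction l with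
  | nil => rfl
  | cons x l ih => simp [ih]

-- ===== VERDICT (by name: the statement is the Claim_ definition above) =====
theorem extract_introns_spec : Claim_equal_extract_introns := by
  intro sequences _dom hpre
  unfold Spec_extract_introns extract_introns extract_introns_alt
  have hmapeq : sequences.map pvNormA = sequences.map pvNormB :=
    List.map_congr_left (fun q _ => pvNorm_eq q)
  rw [hmapeq]
  have hlne : PySem.List.sorted (sequences.map pvNormB) (fun t => t.1) false ≠ [] := by
    simp only [ne_eq, PySem.List.sorted_eq_nil_iff, List.map_eq_nil_iff]
    simpa [Pre_extract_introns] using hpre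
  obtain ⟨c, rest, hcons⟩ := List.exists_cons_of_ne_nil hlne
  have hmem : ∀ p ∈ (c :: rest), p.1 ≤ p.2 := by
    intro p hp
    have hp' : p ∈ sequences.map pvNormB :=
      (PySem.List.mem_sorted _ _ _ _).mp (hcons ▸ hp)
    obtain ⟨q, _, hq⟩ := List.mem_map.mp hp'
    rw [← hq]; unfold pvNormB; simp
  have hhead : ∀ y ∈ (c :: rest), c.1 ≤ y.1 := by
    intro y hy
    exact PySem.List.key_head_sorted_le _ _ hcons y ((PySem.List.mem_sorted _ _ _ _).mp (hcons.symm ▸ hy))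
  simp only [hcons]
  have hmin : PySem.List.min? ((c :: rest).map (fun s => s.1)) (fun y => y) = some c.1 := by
    have : (c :: rest).map (fun s : Int × Int => s.1) = c.1 :: rest.map (fun s => s.1) := rfl
    rw [this]
    apply pvMin_head
    intro y hy
    obtain ⟨p, hp, hpy⟩ := List.mem_map.mp hy
    rw [← hpy]
    exact hhead p (List.mem_cons_of_mem _ hp)
  rw [hmin, pvZip_proj]
  have hc : c.1 ≤ c.2 := hmem c (List.mem_cons_self ..)
  have hmaxc : max c.1 c.2 = c.2 := by omega
  have hifc : ¬ (c.1 > c.1 + 1) := by omega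
  obtain ⟨c1, c2⟩ := c
  simp only [pvALoop, if_neg hifc, hmaxc]
  have hrest : ∀ p ∈ rest, p.1 ≤ p.2 := fun p hp => hmem p (List.mem_cons_of_mem _ hp)
  simpa [pvGaps] using pvMain rest (c1, c2) [] hrest
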